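-- pv_equiv track=rewrite | github.com/jstafford66/AdventOfCode | 2019/Day8ImageLayers.py | createImg
-- ===== SOURCE A (Python) =====
-- def createImg(layers, width, height):
--
--     img = []
--     for r in layers[0]['img']:
--         i = []
--         for s in r:
--             i.append(' ')
--
--         img.append(i)
--
--     for layer in reversed(layers):
--
--         i = layer['img']
--
--         for h in range(height):
--             for w in range(width):
--                 # 0 - Black, 1 - White, 2 - Trans
--                 if i[h][w] == '0':
--                     img[h][w] = " "
--                 elif i[h][w] == '1':
--                     img[h][w] = "#"
--                 # elif i[h][w] == '2':
--                 #     continue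
--
--     return img
-- ===== SOURCE B (Python) =====
-- def createImg(layers, width, height):
--     # Blank canvas shaped like the layer grid; each pixel in the painting
--     # region is decided by the topmost non-transparent layer.
--     img = [[' ' for _ in row] for row in layers[0]['img']]
--     for h in range(height):
--         for w in range(width):
--             for layer in layers:
--                 p = layer['img'][h][w]
--                 if p == '0':
--                     img[h][w] = ' '
--                     break
--                 if p == '1':
--                     img[h][w] = '#'
--                     break
--     return img
-- ===== Notes on version B (the rewrite author's own statement) =====
-- stated objective: simpler
-- what changed: A repaints the whole canvas once per layer, iterating layers bottom-up and overwriting every opaque pixel; B makes a single pass over the painting region and decides each pixel by a top-down scan of the layers that stops at the first opaque ('0'/'1') pixel.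
import Mathlib
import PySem

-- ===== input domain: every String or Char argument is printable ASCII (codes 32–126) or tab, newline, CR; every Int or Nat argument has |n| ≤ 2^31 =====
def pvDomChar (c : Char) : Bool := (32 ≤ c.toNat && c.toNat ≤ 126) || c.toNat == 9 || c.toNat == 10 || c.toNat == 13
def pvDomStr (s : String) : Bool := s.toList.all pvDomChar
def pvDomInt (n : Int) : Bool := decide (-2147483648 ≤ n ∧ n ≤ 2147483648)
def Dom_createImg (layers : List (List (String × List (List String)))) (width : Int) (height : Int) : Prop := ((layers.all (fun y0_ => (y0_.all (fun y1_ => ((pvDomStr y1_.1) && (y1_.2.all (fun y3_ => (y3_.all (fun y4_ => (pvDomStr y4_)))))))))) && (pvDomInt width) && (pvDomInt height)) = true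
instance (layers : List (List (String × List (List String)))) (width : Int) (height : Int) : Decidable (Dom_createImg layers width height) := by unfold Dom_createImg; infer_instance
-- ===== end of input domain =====

-- B replaces A's bottom-up full repainting of the canvas (one sweep per layer) by a
-- single sweep of the painting region that resolves each pixel with a top-down scan
-- stopping at the first opaque layer (objective: simpler).
-- Equivalence is about the RETURN value; neither Lean port mutates anything.

-- ===== PORT A =====
-- inner-loop body of A's double loop (exact: pyGetD/pySetD are Python's reads/writes
-- when the index is in range; out-of-range Python raises IndexError, excluded by Pre_)
def pvStepW (i : List (List String)) (h : Int) : List (List String) → Int → List (List String) :=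
  fun img w =>
    if PySem.List.pyGetD (PySem.List.pyGetD i h []) w "" = "0" then
      PySem.List.pySetD img h (PySem.List.pySetD (PySem.List.pyGetD img h []) w " ")
    else if PySem.List.pyGetD (PySem.List.pyGetD i h []) w "" = "1" then
      PySem.List.pySetD img h (PySem.List.pySetD (PySem.List.pyGetD img h []) w "#")
    else img

def pvPaintLayer (img : List (List String)) (i : List (List String)) (width height : Int) : List (List String) :=
  (PySem.List.pyRange 0 height 1).foldl (fun img h => (PySem.List.pyRange 0 width 1).foldl (pvStepW i h) img) img

def createImg (layers : List (List (String × List (List String)))) (width : Int) (height : Int) : List (List String) :=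
  -- layers[0] (IndexError on [] excluded by Pre_) and layer['img'] (KeyError excluded by Pre_)
  let img0 := (PySem.Dict.getD (PySem.Dict.mk (PySem.List.pyGetD layers 0 [])) "img" []).map (fun r => r.map (fun _ => " "))
  (layers.reverse).foldl (fun img layer => pvPaintLayer img (PySem.Dict.getD (PySem.Dict.mk layer) "img" []) width height) img0

-- ===== PORT B =====
-- B's innermost for-with-break: the assignment made by the first layer whose pixel
-- at (h, w) is '0' or '1' (none when every layer is transparent there)
def pvFindPix : List (List (String × List (List String))) → Int → Int → Option String
  | [], _, _ => none
  | layer :: rest, h, w =>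
    let p := PySem.List.pyGetD (PySem.List.pyGetD (PySem.Dict.getD (PySem.Dict.mk layer) "img" []) h []) w ""
    if p = "0" then some " " else if p = "1" then some "#" else pvFindPix rest h w

def pvStepB (layers : List (List (String × List (List String)))) (h : Int) : List (List String) → Int → List (List String) :=
  fun img w =>
    match pvFindPix layers h w with
    | some v => PySem.List.pySetD img h (PySem.List.pySetD (PySem.List.pyGetD img h []) w v)
    | none => img

def createImg_alt (layers : List (List (String × List (List String)))) (width : Int) (height : Int) : List (List String) :=
  let img0 := (PySem.Dict.getD (PySem.Dict.mk (PySem.List.pyGetD layers 0 [])) "img" []).map (fun r => r.map (fun _ => " "))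
  (PySem.List.pyRange 0 height 1).foldl (fun img h =>
    (PySem.List.pyRange 0 width 1).foldl (pvStepB layers h) img) img0

-- ===== PRECONDITION & SPEC =====
-- Exactly the inputs where A returns: layers nonempty (layers[0]), every layer has an
-- 'img' key, and — unless width ≤ 0, in which case the inner loop never reads a pixel —
-- the first `height` rows exist and each has at least `width` pixels
-- (otherwise A's reads raise IndexError / the lookup raises KeyError).
def Pre_createImg (layers : List (List (String × List (List String)))) (width : Int) (height : Int) : Prop :=
  layers ≠ [] ∧ ∀ layer ∈ layers,
    (PySem.Dict.get? (PySem.Dict.mk layer) "img").isSome = true ∧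
    (width ≤ 0 ∨
      (height ≤ ((PySem.Dict.getD (PySem.Dict.mk layer) "img" []).length : Int) ∧
       ∀ row ∈ (PySem.Dict.getD (PySem.Dict.mk layer) "img" []).take height.toNat, width ≤ (row.length : Int)))
instance (layers : List (List (String × List (List String)))) (width : Int) (height : Int) : Decidable (Pre_createImg layers width height) := by unfold Pre_createImg; infer_instance

def pvWitness_createImg : (List (List (String × List (List String)))) × Int × Int :=
  ([[("img", [["1", "2"], ["2", "0"]])], [("img", [["2", "2"], ["2", "2"]])]], 2, 2)

def Spec_createImg (layers : List (List (String × List (List String)))) (width : Int) (height : Int) (out : List (List String)) : Prop := out = createImg_alt layers width height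
instance (layers : List (List (String × List (List String)))) (width : Int) (height : Int) (out : List (List String)) : Decidable (Spec_createImg layers width height out) := by unfold Spec_createImg; infer_instance

-- ===== CLAIM (what is proved, stated in full; the proofs are below) =====
def Claim_equal_createImg : Prop := ∀ (layers : List (List (String × List (List String)))) (width : Int) (height : Int), Dom_createImg layers width height → Pre_createImg layers width height → Spec_createImg layers width height (createImg layers width height)

-- ===== LEMMAS AND PROOFS =====

-- proof-side helpers
def pvCell (img : List (List String)) (h w : Nat) : String := (img.getD h []).getD w " "

def pvPixc (i : List (List String)) (h w : Nat) : Option String :=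
  if (i.getD h []).getD w "" = "0" then some " "
  else if (i.getD h []).getD w "" = "1" then some "#" else none

-- top-down resolution, as used to describe A's result
def pvResolveD : List (List (String × List (List String))) → Nat → Nat → String → String
  | [], _, _, d => d
  | layer :: rest, h, w, d =>
    match pvPixc (PySem.Dict.getD (PySem.Dict.mk layer) "img" []) h w with
    | some v => v
    | none => pvResolveD rest h w d

-- nat-index form of B's pvFindPix
def pvFindO : List (List (String × List (List String))) → Nat → Nat → Option String
  | [], _, _ => none
  | layer :: rest, h, w =>
    match pvPixc (PySem.Dict.getD (PySem.Dict.mk layer) "img" []) h w with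
    | some v => some v
    | none => pvFindO rest h w

theorem pvFind_eq (ls : List (List (String × List (List String)))) (h w : Nat) :
    pvFindPix ls (h : Int) (w : Int) = pvFindO ls h w := by
  induction ls with
  | nil => rfl
  | cons layer rest ih =>
    simp only [pvFindPix, pvFindO, pvPixc, PySem.List.pyGetD_natCast, ih]
    split_ifs <;> rfl

theorem pvResolveD_eq_find (ls : List (List (String × List (List String)))) (h w : Nat) (d : String) :
    pvResolveD ls h w d = (pvFindO ls h w).getD d := by
  induction ls with
  | nil => rfl
  | cons layer rest ih =>
    simp only [pvResolveD, pvFindO, ih]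
    rcases pvPixc (PySem.Dict.getD (PySem.Dict.mk layer) "img" []) h w <;> rfl

theorem pv_cell_set2 (img : List (List String)) (hn wn : Nat) (v : String)
    (hL : hn < img.length) (hS : wn < (img.getD hn []).length) (h' w' : Nat) :
    pvCell (img.set hn ((img.getD hn []).set wn v)) h' w' =
      if h' = hn ∧ w' = wn then v else pvCell img h' w' := by
  unfold pvCell
  rcases eq_or_ne h' hn with rfl | e1
  · rcases eq_or_ne w' wn with rfl | e2
    · simp_all [List.getD_eq_getElem?_getD]
    · simp_all [List.getD_eq_getElem?_getD, Ne.symm e2]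
  · simp_all [List.getD_eq_getElem?_getD, Ne.symm e1]

-- ---- A-side loop lemmas ----

theorem pvStep_cell (i : List (List String)) (h w : Int) (hh : 0 ≤ h) (hw : 0 ≤ w)
    (img : List (List String)) (hL : h.toNat < img.length)
    (hS : w.toNat < (img.getD h.toNat []).length) (h' w' : Nat) :
    pvCell (pvStepW i h img w) h' w' =
      if h' = h.toNat ∧ w' = w.toNat ∧ (pvPixc i h.toNat w.toNat).isSome
      then (pvPixc i h.toNat w.toNat).getD " " else pvCell img h' w' := by
  unfold pvStepW
  simp only [PySem.List.pyGetD_of_nonneg, PySem.List.pySetD_of_nonneg, hh, hw]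
  by_cases h0 : (i.getD h.toNat []).getD w.toNat "" = "0"
  · rw [if_pos h0, pv_cell_set2 img h.toNat w.toNat " " hL hS h' w']
    simp only [List.getD_eq_getElem?_getD] at h0
    simp [pvPixc, h0]
  · by_cases h1 : (i.getD h.toNat []).getD w.toNat "" = "1"
    · rw [if_neg h0, if_pos h1, pv_cell_set2 img h.toNat w.toNat "#" hL hS h' w']
      simp only [List.getD_eq_getElem?_getD] at h0 h1
      simp [pvPixc, h1]
    · rw [if_neg h0, if_neg h1]
      simp only [List.getD_eq_getElem?_getD] at h0 h1
      simp [pvPixc, h0, h1]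

theorem pvStep_len (i : List (List String)) (h w : Int) (img : List (List String)) :
    (pvStepW i h img w).length = img.length := by
  unfold pvStepW; split_ifs <;> simp

theorem pvStep_rowlen (i : List (List String)) (h w : Int) (hh : 0 ≤ h) (hw : 0 ≤ w)
    (img : List (List String)) (t : Nat) :
    ((pvStepW i h img w).getD t []).length = (img.getD t []).length := by
  unfold pvStepW
  simp only [PySem.List.pyGetD_of_nonneg, PySem.List.pySetD_of_nonneg, hh, hw]
  split_ifs <;> simp [List.getD_eq_getElem?_getD, List.getElem?_set] <;> split_ifs <;> simp_all

theorem pvRange_cast (b : Int) :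
    PySem.List.pyRange 0 b 1 = (List.range b.toNat).map (fun (k : Nat) => (k : Int)) := by
  simp [PySem.List.pyRange_one]

theorem pv_foldl_const {α β : Type} (l : List α) (b : β) :
    l.foldl (fun b _ => b) b = b := by
  induction l generalizing b <;> simp_all

-- A's inner loop over w ∈ range(m), pointwise
theorem pvInner_cell (i : List (List String)) (h : Int) (hh : 0 ≤ h)
    (img : List (List String)) (hL : h.toNat < img.length) (m : Nat) :
    m ≤ (img.getD h.toNat []).length →
    ((((List.range m).map (fun (k : Nat) => (k : Int))).foldl (pvStepW i h) img).length = img.length) ∧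
    (∀ t, ((((List.range m).map (fun (k : Nat) => (k : Int))).foldl (pvStepW i h) img).getD t []).length
        = (img.getD t []).length) ∧
    (∀ h' w' : Nat,
      pvCell (((List.range m).map (fun (k : Nat) => (k : Int))).foldl (pvStepW i h) img) h' w' =
        (if h' = h.toNat ∧ w' < m ∧ (pvPixc i h.toNat w').isSome
         then (pvPixc i h.toNat w').getD " " else pvCell img h' w')) := by
  induction m with
  | zero => exact fun _ => ⟨rfl, fun t => rfl, by intro h' w'; simp⟩
  | succ m ih =>
    intro hS
    obtain ⟨l1, l2, l3⟩ := ih (Nat.le_of_succ_le hS)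
    rw [List.range_succ, List.map_append, List.foldl_append]
    set F := ((List.range m).map (fun (k : Nat) => (k : Int))).foldl (pvStepW i h) img with hF
    simp only [List.map_cons, List.map_nil, List.foldl_cons, List.foldl_nil]
    have hL' : h.toNat < F.length := by rw [l1]; exact hL
    have hS' : ((m : Int)).toNat < (F.getD h.toNat []).length := by
      rw [l2, Int.toNat_natCast]; omega
    refine ⟨by rw [pvStep_len, l1], fun t => by rw [pvStep_rowlen i h (m : Int) hh (by positivity), l2], ?_⟩
    intro h' w'
    rw [pvStep_cell i h (m : Int) hh (by positivity) F hL' hS' h' w', l3 h' w']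
    simp only [Int.toNat_natCast]
    by_cases c1 : h' = h.toNat
    · by_cases c2 : w' = m
      · rcases e : pvPixc i h.toNat m with _ | v <;> simp [c1, c2, e]
      · have hiff : (w' < m) ↔ (w' < m + 1) := by omega
        simp [c2, hiff]
    · simp [c1]

-- A's outer loop over h ∈ range(n), pointwise
theorem pvOuter_cell (i : List (List String)) (width : Int)
    (img : List (List String)) (n : Nat) :
    n ≤ img.length → (∀ t < n, width.toNat ≤ (img.getD t []).length) →
    (((((List.range n).map (fun (k : Nat) => (k : Int))).foldl
        (fun img h => (PySem.List.pyRange 0 width 1).foldl (pvStepW i h) img) img).length = img.length)) ∧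
    (∀ t, ((((List.range n).map (fun (k : Nat) => (k : Int))).foldl
        (fun img h => (PySem.List.pyRange 0 width 1).foldl (pvStepW i h) img) img).getD t []).length
        = (img.getD t []).length) ∧
    (∀ h' w' : Nat,
      pvCell (((List.range n).map (fun (k : Nat) => (k : Int))).foldl
        (fun img h => (PySem.List.pyRange 0 width 1).foldl (pvStepW i h) img) img) h' w' =
      (if h' < n ∧ w' < width.toNat ∧ (pvPixc i h' w').isSome
       then (pvPixc i h' w').getD " " else pvCell img h' w')) := by
  induction n with
  | zero => exact fun _ _ => ⟨rfl, fun t => rfl, by intro h' w'; simp⟩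
  | succ n ih =>
    intro hL hW
    obtain ⟨l1, l2, l3⟩ := ih (Nat.le_of_succ_le hL) (fun t ht => hW t (Nat.lt_succ_of_lt ht))
    rw [List.range_succ, List.map_append, List.foldl_append]
    set F := ((List.range n).map (fun (k : Nat) => (k : Int))).foldl
        (fun img h => (PySem.List.pyRange 0 width 1).foldl (pvStepW i h) img) img with hF
    simp only [List.map_cons, List.map_nil, List.foldl_cons, List.foldl_nil]
    rw [pvRange_cast width]
    have hL' : ((n : Int)).toNat < F.length := by rw [l1]; simp; omega
    have hS' : width.toNat ≤ (F.getD ((n : Int)).toNat []).length := by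
      rw [l2]; simp only [Int.toNat_natCast]; exact hW n (Nat.lt_succ_self n)
    obtain ⟨m1, m2, m3⟩ := pvInner_cell i (n : Int) (by positivity) F hL' width.toNat hS'
    refine ⟨by rw [m1, l1], fun t => by rw [m2, l2], ?_⟩
    intro h' w'
    rw [m3 h' w', l3 h' w']
    simp only [Int.toNat_natCast]
    by_cases c1 : h' = n
    · rcases e : pvPixc i n w' with _ | v <;> simp [c1, e]
    · have hiff : (h' < n) ↔ (h' < n + 1) := by omega
      simp [c1, hiff]

-- the fold of A over reversed layers, pointwise
theorem pvLayers_cell (width height : Int)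
    (ls : List (List (String × List (List String)))) (img : List (List String))
    (hL : height.toNat ≤ img.length)
    (hW : ∀ t < height.toNat, width.toNat ≤ (img.getD t []).length) :
    ((ls.foldr (fun layer acc => pvPaintLayer acc (PySem.Dict.getD (PySem.Dict.mk layer) "img" []) width height) img).length = img.length) ∧
    (∀ t, ((ls.foldr (fun layer acc => pvPaintLayer acc (PySem.Dict.getD (PySem.Dict.mk layer) "img" []) width height) img).getD t []).length = (img.getD t []).length) ∧
    (∀ h' w' : Nat,
      pvCell (ls.foldr (fun layer acc => pvPaintLayer acc (PySem.Dict.getD (PySem.Dict.mk layer) "img" []) width height) img) h' w' =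
        (if h' < height.toNat ∧ w' < width.toNat
         then pvResolveD ls h' w' (pvCell img h' w') else pvCell img h' w')) := by
  induction ls with
  | nil => exact ⟨rfl, fun t => rfl, by intro h2 w2; simp [pvResolveD]⟩
  | cons layer rest ih =>
    obtain ⟨l1, l2, l3⟩ := ih
    simp only [List.foldr_cons]
    set F := rest.foldr (fun layer acc => pvPaintLayer acc (PySem.Dict.getD (PySem.Dict.mk layer) "img" []) width height) img with hF
    unfold pvPaintLayer
    rw [pvRange_cast height]
    obtain ⟨m1, m2, m3⟩ := pvOuter_cell (PySem.Dict.getD (PySem.Dict.mk layer) "img" []) width F height.toNat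
      (by rw [l1]; exact hL) (fun t ht => by rw [l2]; exact hW t ht)
    refine ⟨by rw [m1, l1], fun t => by rw [m2, l2], ?_⟩
    intro h' w'
    rw [m3 h' w', l3 h' w']
    rcases e : pvPixc (PySem.Dict.getD (PySem.Dict.mk layer) "img" []) h' w' with _ | v
    · simp only [e, Option.isSome_none, Bool.false_eq_true, and_false, if_false, pvResolveD]
    · simp only [e, Option.isSome_some, and_true, pvResolveD, Option.getD_some]
      by_cases c : h' < height.toNat ∧ w' < width.toNat
      · rw [if_pos c, if_pos c]
      · rw [if_neg c, if_neg c, if_neg c]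

-- ---- B-side loop lemmas ----

theorem pvStepB_cell (ls : List (List (String × List (List String)))) (h w : Int)
    (hh : 0 ≤ h) (hw : 0 ≤ w) (img : List (List String)) (hL : h.toNat < img.length)
    (hS : w.toNat < (img.getD h.toNat []).length) (h' w' : Nat) :
    pvCell (pvStepB ls h img w) h' w' =
      if h' = h.toNat ∧ w' = w.toNat ∧ (pvFindO ls h.toNat w.toNat).isSome
      then (pvFindO ls h.toNat w.toNat).getD " " else pvCell img h' w' := by
  unfold pvStepB
  have hfe : pvFindPix ls h w = pvFindO ls h.toNat w.toNat := by
    have := pvFind_eq ls h.toNat w.toNat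
    rwa [Int.toNat_of_nonneg hh, Int.toNat_of_nonneg hw] at this
  rw [hfe]
  rcases e : pvFindO ls h.toNat w.toNat with _ | v
  · simp [e]
  · simp only [PySem.List.pyGetD_of_nonneg, PySem.List.pySetD_of_nonneg, hh, hw]
    rw [pv_cell_set2 img h.toNat w.toNat v hL hS h' w']
    simp [e]

theorem pvStepB_len (ls : List (List (String × List (List String)))) (h w : Int)
    (img : List (List String)) : (pvStepB ls h img w).length = img.length := by
  unfold pvStepB
  rcases pvFindPix ls h w <;> simp

theorem pvStepB_rowlen (ls : List (List (String × List (List String)))) (h w : Int)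
    (hh : 0 ≤ h) (hw : 0 ≤ w) (img : List (List String)) (t : Nat) :
    ((pvStepB ls h img w).getD t []).length = (img.getD t []).length := by
  unfold pvStepB
  rcases pvFindPix ls h w with _ | v
  · rfl
  · simp only [PySem.List.pyGetD_of_nonneg, PySem.List.pySetD_of_nonneg, hh, hw]
    simp [List.getD_eq_getElem?_getD, List.getElem?_set]
    split_ifs <;> simp_all

-- B's inner loop over w ∈ range(m), pointwise
theorem pvInnerB_cell (ls : List (List (String × List (List String)))) (h : Int) (hh : 0 ≤ h)
    (img : List (List String)) (hL : h.toNat < img.length) (m : Nat) :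
    m ≤ (img.getD h.toNat []).length →
    ((((List.range m).map (fun (k : Nat) => (k : Int))).foldl (pvStepB ls h) img).length = img.length) ∧
    (∀ t, ((((List.range m).map (fun (k : Nat) => (k : Int))).foldl (pvStepB ls h) img).getD t []).length
        = (img.getD t []).length) ∧
    (∀ h' w' : Nat,
      pvCell (((List.range m).map (fun (k : Nat) => (k : Int))).foldl (pvStepB ls h) img) h' w' =
        (if h' = h.toNat ∧ w' < m ∧ (pvFindO ls h.toNat w').isSome
         then (pvFindO ls h.toNat w').getD " " else pvCell img h' w')) := by
  induction m with
  | zero => exact fun _ => ⟨rfl, fun t => rfl, by intro h' w'; simp⟩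
  | succ m ih =>
    intro hS
    obtain ⟨l1, l2, l3⟩ := ih (Nat.le_of_succ_le hS)
    rw [List.range_succ, List.map_append, List.foldl_append]
    set F := ((List.range m).map (fun (k : Nat) => (k : Int))).foldl (pvStepB ls h) img with hF
    simp only [List.map_cons, List.map_nil, List.foldl_cons, List.foldl_nil]
    have hL' : h.toNat < F.length := by rw [l1]; exact hL
    have hS' : ((m : Int)).toNat < (F.getD h.toNat []).length := by
      rw [l2, Int.toNat_natCast]; omega
    refine ⟨by rw [pvStepB_len, l1], fun t => by rw [pvStepB_rowlen ls h (m : Int) hh (by positivity), l2], ?_⟩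
    intro h' w'
    rw [pvStepB_cell ls h (m : Int) hh (by positivity) F hL' hS' h' w', l3 h' w']
    simp only [Int.toNat_natCast]
    by_cases c1 : h' = h.toNat
    · by_cases c2 : w' = m
      · rcases e : pvFindO ls h.toNat m with _ | v <;> simp [c1, c2, e]
      · have hiff : (w' < m) ↔ (w' < m + 1) := by omega
        simp [c2, hiff]
    · simp [c1]

-- B's outer loop over h ∈ range(n), pointwise
theorem pvOuterB_cell (ls : List (List (String × List (List String)))) (width : Int)
    (img : List (List String)) (n : Nat) :
    n ≤ img.length → (∀ t < n, width.toNat ≤ (img.getD t []).length) →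
    (((((List.range n).map (fun (k : Nat) => (k : Int))).foldl
        (fun img h => (PySem.List.pyRange 0 width 1).foldl (pvStepB ls h) img) img).length = img.length)) ∧
    (∀ t, ((((List.range n).map (fun (k : Nat) => (k : Int))).foldl
        (fun img h => (PySem.List.pyRange 0 width 1).foldl (pvStepB ls h) img) img).getD t []).length
        = (img.getD t []).length) ∧
    (∀ h' w' : Nat,
      pvCell (((List.range n).map (fun (k : Nat) => (k : Int))).foldl
        (fun img h => (PySem.List.pyRange 0 width 1).foldl (pvStepB ls h) img) img) h' w' =
      (if h' < n ∧ w' < width.toNat ∧ (pvFindO ls h' w').isSome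
       then (pvFindO ls h' w').getD " " else pvCell img h' w')) := by
  induction n with
  | zero => exact fun _ _ => ⟨rfl, fun t => rfl, by intro h' w'; simp⟩
  | succ n ih =>
    intro hL hW
    obtain ⟨l1, l2, l3⟩ := ih (Nat.le_of_succ_le hL) (fun t ht => hW t (Nat.lt_succ_of_lt ht))
    rw [List.range_succ, List.map_append, List.foldl_append]
    set F := ((List.range n).map (fun (k : Nat) => (k : Int))).foldl
        (fun img h => (PySem.List.pyRange 0 width 1).foldl (pvStepB ls h) img) img with hF
    simp only [List.map_cons, List.map_nil, List.foldl_cons, List.foldl_nil]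
    rw [pvRange_cast width]
    have hL' : ((n : Int)).toNat < F.length := by rw [l1]; simp; omega
    have hS' : width.toNat ≤ (F.getD ((n : Int)).toNat []).length := by
      rw [l2]; simp only [Int.toNat_natCast]; exact hW n (Nat.lt_succ_self n)
    obtain ⟨m1, m2, m3⟩ := pvInnerB_cell ls (n : Int) (by positivity) F hL' width.toNat hS'
    refine ⟨by rw [m1, l1], fun t => by rw [m2, l2], ?_⟩
    intro h' w'
    rw [m3 h' w', l3 h' w']
    simp only [Int.toNat_natCast]
    by_cases c1 : h' = n
    · rcases e : pvFindO ls n w' with _ | v <;> simp [c1, e]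
    · have hiff : (h' < n) ↔ (h' < n + 1) := by omega
      simp [c1, hiff]

-- ===== VERDICT (by name: the statement is the Claim_ definition above) =====
theorem createImg_spec : Claim_equal_createImg := by
  intro layers width height _ hpre
  obtain ⟨hne, hall⟩ := hpre
  unfold Spec_createImg
  rcases layers with _ | ⟨l0, ls⟩
  · exact absurd rfl hne
  obtain ⟨hsome, hdisj⟩ := hall l0 (List.mem_cons_self)
  set rows0 := PySem.Dict.getD (PySem.Dict.mk l0) "img" [] with hrows
  set img0 := rows0.map (fun r => r.map (fun _ => " ")) with himg0
  clear_value rows0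
  have i0len : img0.length = rows0.length := by simp [himg0]
  have i0row : ∀ t, (img0.getD t []).length = (rows0.getD t []).length := by
    intro t
    simp only [himg0, List.getD_eq_getElem?_getD, List.getElem?_map]
    rcases rows0[t]? with _ | r <;> simp
  have i0cell : ∀ h' w' : Nat, pvCell img0 h' w' = " " := by
    intro h' w'
    unfold pvCell
    simp only [himg0, List.getD_eq_getElem?_getD, List.getElem?_map]
    rcases rows0[h']? with _ | r
    · simp
    · simp only [Option.map_some, Option.getD_some, List.getElem?_map]
      rcases r[w']? with _ | c <;> simp
  unfold createImg createImg_alt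
  simp only [PySem.List.pyGetD_zero_cons]
  rw [List.foldl_reverse]
  rw [← hrows, ← himg0]
  by_cases hw0 : width ≤ 0
  · -- width ≤ 0: both inner loops are empty, both results are the blank canvas
    have paint_id : ∀ (acc i : List (List String)), pvPaintLayer acc i width height = acc := by
      intro acc i
      unfold pvPaintLayer
      rw [PySem.List.pyRange_one_eq_nil hw0]
      simp only [List.foldl_nil]
      exact pv_foldl_const _ _
    have hfoldA : ∀ (L : List (List (String × List (List String)))) (b : List (List String)),
        L.foldr (fun layer acc => pvPaintLayer acc (PySem.Dict.getD (PySem.Dict.mk layer) "img" []) width height) b = b := by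
      intro L b
      induction L with
      | nil => rfl
      | cons x xs ih => rw [List.foldr_cons, ih, paint_id]
    rw [hfoldA]
    rw [PySem.List.pyRange_one_eq_nil hw0]
    simp only [List.foldl_nil]
    exact (pv_foldl_const _ _).symm
  replace hdisj := hdisj.resolve_left hw0
  obtain ⟨hhle, hrowle⟩ := hdisj
  have hLen : height.toNat ≤ rows0.length := by omega
  have hWt : ∀ t < height.toNat, width.toNat ≤ (rows0.getD t []).length := by
    intro t ht
    have htl : t < rows0.length := lt_of_lt_of_le ht hLen
    have hmem : rows0[t] ∈ rows0.take height.toNat := by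
      have : (rows0.take height.toNat)[t]'(by simp; omega) = rows0[t] := List.getElem_take
      exact this ▸ List.getElem_mem _
    have h1 := hrowle _ hmem
    have h2 : (rows0.getD t []) = rows0[t] := by
      simp [List.getD_eq_getElem?_getD, List.getElem?_eq_getElem htl]
    rw [h2]; omega
  obtain ⟨L1, L2, L3⟩ := pvLayers_cell width height (l0 :: ls) img0
    (by rw [i0len]; exact hLen) (fun t ht => by rw [i0row]; exact hWt t ht)
  rw [pvRange_cast height]
  obtain ⟨M1, M2, M3⟩ := pvOuterB_cell (l0 :: ls) width img0 height.toNat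
    (by rw [i0len]; exact hLen) (fun t ht => by rw [i0row]; exact hWt t ht)
  set XA := (l0 :: ls).foldr (fun layer acc => pvPaintLayer acc (PySem.Dict.getD (PySem.Dict.mk layer) "img" []) width height) img0 with hXA
  set XB := ((List.range height.toNat).map (fun (k : Nat) => (k : Int))).foldl
      (fun img h => (PySem.List.pyRange 0 width 1).foldl (pvStepB (l0 :: ls) h) img) img0 with hXB
  apply List.ext_getElem
  · rw [L1, M1]
  · intro h' hA hB
    apply List.ext_getElem
    · have eA : XA[h'] = XA.getD h' [] := by
        simp [List.getD_eq_getElem?_getD, List.getElem?_eq_getElem hA]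
      have eB : XB[h'] = XB.getD h' [] := by
        simp [List.getD_eq_getElem?_getD, List.getElem?_eq_getElem hB]
      rw [eA, eB, L2 h', M2 h']
    · intro w' hwA hwB
      have eA : XA[h'] = XA.getD h' [] := by
        simp [List.getD_eq_getElem?_getD, List.getElem?_eq_getElem hA]
      have eB : XB[h'] = XB.getD h' [] := by
        simp [List.getD_eq_getElem?_getD, List.getElem?_eq_getElem hB]
      have lhsA : XA[h'][w'] = pvCell XA h' w' := by
        unfold pvCell
        rw [← eA]
        simp [List.getD_eq_getElem?_getD, List.getElem?_eq_getElem hwA]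
      have lhsB : XB[h'][w'] = pvCell XB h' w' := by
        unfold pvCell
        rw [← eB]
        simp [List.getD_eq_getElem?_getD, List.getElem?_eq_getElem hwB]
      rw [lhsA, lhsB, L3 h' w', M3 h' w', i0cell]
      by_cases c : h' < height.toNat ∧ w' < width.toNat
      · rw [if_pos c, pvResolveD_eq_find]
        rcases e : pvFindO (l0 :: ls) h' w' with _ | v
        · simp [e, c]
        · simp [e, c]
      · rw [if_neg c, if_neg (by tauto)]
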